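-- pv_equiv track=rewrite | github.com/ldfLearning/NSSA_BackEnd | situation_prediction/utils.py | calculate_attack_num
-- ===== SOURCE A (Python) =====
-- DEFAULT_SITUATION_VALUE = 1000
--
-- DEFAULT_SITUATION_TIMES = 100
--
-- def calculate_attack_num(serialized_data):
--     attack_score = {
--         0: 7,
--         1: 9,
--         2: 5,
--         3: 9,
--         4: 9,
--         5: 9,
--         6: 6,
--         7: 4,
--         8: 3,
--         9: 3
--     }  # 为每种攻击类型赋予一个权重
--     attack_num = 0
--     for data in serialized_data:
--         attack_type = data['type']
--         attack_num += attack_score[attack_type] * DEFAULT_SITUATION_TIMES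
--     return attack_num + DEFAULT_SITUATION_VALUE
-- ===== SOURCE B (Python) =====
-- DEFAULT_SITUATION_VALUE = 1000
--
-- DEFAULT_SITUATION_TIMES = 100
--
-- def calculate_attack_num(serialized_data):
--     # collect all attack types, then for each of the 10 known types add
--     # its score (indexed from a plain list) times its number of occurrences
--     types = [data['type'] for data in serialized_data]
--     scores = [7, 9, 5, 9, 9, 9, 6, 4, 3, 3]
--     weighted = sum(scores[t] * types.count(t) for t in range(10))
--     return DEFAULT_SITUATION_TIMES * weighted + DEFAULT_SITUATION_VALUE
-- ===== Notes on version B (the rewrite author's own statement) =====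
-- stated objective: alternative
-- what changed: B drops the dict and the per-element accumulator: it extracts the type list, then iterates over the ten fixed attack types, adding score (from a plain list, indexed by type) times the count of that type in the list, scaling by the weight factor once at the end.
import Mathlib
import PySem

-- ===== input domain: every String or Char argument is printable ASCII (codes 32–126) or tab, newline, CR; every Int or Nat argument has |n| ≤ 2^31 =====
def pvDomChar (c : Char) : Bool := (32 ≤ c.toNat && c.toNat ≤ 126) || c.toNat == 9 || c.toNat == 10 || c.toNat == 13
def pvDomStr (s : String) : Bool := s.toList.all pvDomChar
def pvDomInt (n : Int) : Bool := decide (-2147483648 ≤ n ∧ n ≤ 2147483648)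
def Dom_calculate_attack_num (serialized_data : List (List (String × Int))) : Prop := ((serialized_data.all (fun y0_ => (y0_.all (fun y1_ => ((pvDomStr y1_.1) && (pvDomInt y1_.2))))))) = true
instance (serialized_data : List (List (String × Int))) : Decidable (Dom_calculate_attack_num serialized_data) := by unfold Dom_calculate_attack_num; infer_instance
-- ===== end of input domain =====

-- B drops the dict and the per-element accumulator: it extracts the type list, then sums
-- score (indexed from a plain list) times the count of each of the ten fixed types (alternative decomposition, same cost).

-- ===== PORT A =====
-- the literal attack_score dict of A
def pvAttackScoreA : PySem.Dict Int Int :=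
  PySem.Dict.ofList [(0, 7), (1, 9), (2, 5), (3, 9), (4, 9), (5, 9), (6, 6), (7, 4), (8, 3), (9, 3)]

def calculate_attack_num (serialized_data : List (List (String × Int))) : Int :=
  (serialized_data.foldl
    (fun attack_num data =>
      let attack_type := (PySem.Dict.mk data).getD "type" 0   -- data['type']; Pre_ guarantees the key exists
      attack_num + pvAttackScoreA.getD attack_type 0 * 100)   -- attack_score[attack_type]; Pre_ guarantees 0..9
    0) + 1000

-- ===== PORT B =====
def calculate_attack_num_alt (serialized_data : List (List (String × Int))) : Int :=
  let types := serialized_data.map (fun data => (PySem.Dict.mk data).getD "type" 0)  -- data['type']; Pre_ guarantees the key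
  let scores : List Int := [7, 9, 5, 9, 9, 9, 6, 4, 3, 3]
  let weighted := (PySem.List.pyRange 0 10 1).foldl
    (fun acc t => acc + ((PySem.List.pyGet? scores t).getD 0) * (types.count t : Int)) 0
  100 * weighted + 1000

-- ===== PRECONDITION & SPEC =====
-- Pre_ excludes exactly the inputs on which Python A raises KeyError: an element without a
-- "type" key, or with a type outside the attack_score keys 0..9.
def Pre_calculate_attack_num (serialized_data : List (List (String × Int))) : Prop :=
  (serialized_data.all (fun data =>
    match (PySem.Dict.mk data).get? "type" with
    | some t => decide (0 ≤ t ∧ t ≤ 9)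
    | none => false)) = true
instance (serialized_data : List (List (String × Int))) : Decidable (Pre_calculate_attack_num serialized_data) := by unfold Pre_calculate_attack_num; infer_instance

def pvWitness_calculate_attack_num : (List (List (String × Int))) := [[("type", 3)], [("type", 3), ("src", 7)]]

def Spec_calculate_attack_num (serialized_data : List (List (String × Int))) (out : Int) : Prop := out = calculate_attack_num_alt serialized_data
instance (serialized_data : List (List (String × Int))) (out : Int) : Decidable (Spec_calculate_attack_num serialized_data out) := by unfold Spec_calculate_attack_num; infer_instance

-- ===== CLAIM (what is proved, stated in full; the proofs are below) =====
def Claim_equal_calculate_attack_num : Prop := ∀ (serialized_data : List (List (String × Int))), Dom_calculate_attack_num serialized_data → Pre_calculate_attack_num serialized_data → Spec_calculate_attack_num serialized_data (calculate_attack_num serialized_data)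

-- ===== LEMMAS AND PROOFS =====

def pvScores : List Int := [7, 9, 5, 9, 9, 9, 6, 4, 3, 3]

-- B's range-of-ten fold, as a function of the extracted type list
def pvWeighted (types : List Int) : Int :=
  (PySem.List.pyRange 0 10 1).foldl
    (fun acc t => acc + ((PySem.List.pyGet? pvScores t).getD 0) * (types.count t : Int)) 0

lemma pvWeighted_nil : pvWeighted [] = 0 := by decide

-- adding one in-range type x to the list adds its score to the weighted count-sum
lemma pvWeighted_cons (x : Int) (l : List Int) (hx0 : 0 ≤ x) (hx9 : x ≤ 9) :
    pvWeighted (x :: l) = pvWeighted l + pvAttackScoreA.getD x 0 := by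
  have hx : x = 0 ∨ x = 1 ∨ x = 2 ∨ x = 3 ∨ x = 4 ∨ x = 5 ∨ x = 6 ∨ x = 7 ∨ x = 8 ∨ x = 9 := by omega
  have hr : PySem.List.pyRange 0 10 1 = [0,1,2,3,4,5,6,7,8,9] := by decide
  rcases hx with h|h|h|h|h|h|h|h|h|h <;> subst h
  · simp [pvWeighted, hr, List.count_cons, pvScores, PySem.List.pyGet?, PySem.List.pyIdx?,
      show pvAttackScoreA.getD 0 0 = (7:Int) from by decide]; ring
  · simp [pvWeighted, hr, List.count_cons, pvScores, PySem.List.pyGet?, PySem.List.pyIdx?,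
      show pvAttackScoreA.getD 1 0 = (9:Int) from by decide]; ring
  · simp [pvWeighted, hr, List.count_cons, pvScores, PySem.List.pyGet?, PySem.List.pyIdx?,
      show pvAttackScoreA.getD 2 0 = (5:Int) from by decide]; ring
  · simp [pvWeighted, hr, List.count_cons, pvScores, PySem.List.pyGet?, PySem.List.pyIdx?,
      show pvAttackScoreA.getD 3 0 = (9:Int) from by decide]; ring
  · simp [pvWeighted, hr, List.count_cons, pvScores, PySem.List.pyGet?, PySem.List.pyIdx?,
      show pvAttackScoreA.getD 4 0 = (9:Int) from by decide]; ring
  · simp [pvWeighted, hr, List.count_cons, pvScores, PySem.List.pyGet?, PySem.List.pyIdx?,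
      show pvAttackScoreA.getD 5 0 = (9:Int) from by decide]; ring
  · simp [pvWeighted, hr, List.count_cons, pvScores, PySem.List.pyGet?, PySem.List.pyIdx?,
      show pvAttackScoreA.getD 6 0 = (6:Int) from by decide]; ring
  · simp [pvWeighted, hr, List.count_cons, pvScores, PySem.List.pyGet?, PySem.List.pyIdx?,
      show pvAttackScoreA.getD 7 0 = (4:Int) from by decide]; ring
  · simp [pvWeighted, hr, List.count_cons, pvScores, PySem.List.pyGet?, PySem.List.pyIdx?,
      show pvAttackScoreA.getD 8 0 = (3:Int) from by decide]; ring
  · simp [pvWeighted, hr, List.count_cons, pvScores, PySem.List.pyGet?, PySem.List.pyIdx?,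
      show pvAttackScoreA.getD 9 0 = (3:Int) from by decide]; ring

-- summing the per-element scores equals the weighted count-sum, when all types are in 0..9
lemma pv_sum_eq_weighted (types : List Int) (h : ∀ t ∈ types, 0 ≤ t ∧ t ≤ 9) :
    (types.map (fun t => pvAttackScoreA.getD t 0 * 100)).sum = 100 * pvWeighted types := by
  induction types with
  | nil => simp [pvWeighted_nil]
  | cons x l ih =>
    have hx := h x (List.mem_cons_self ..)
    rw [List.map_cons, List.sum_cons, pvWeighted_cons x l hx.1 hx.2,
      ih (fun t ht => h t (List.mem_cons_of_mem _ ht))]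
    ring

theorem pv_equiv (sd : List (List (String × Int)))
    (hpre : Pre_calculate_attack_num sd) :
    calculate_attack_num sd = calculate_attack_num_alt sd := by
  unfold calculate_attack_num calculate_attack_num_alt
  dsimp only
  rw [PySem.List.foldl_add (g := fun data => pvAttackScoreA.getD ((PySem.Dict.mk data).getD "type" 0) 0 * 100)]
  have hbounds : ∀ t ∈ sd.map (fun data => (PySem.Dict.mk data).getD "type" 0), 0 ≤ t ∧ t ≤ 9 := by
    intro t ht
    rw [List.mem_map] at ht
    obtain ⟨d, hd, hdt⟩ := ht
    unfold Pre_calculate_attack_num at hpre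
    rw [List.all_eq_true] at hpre
    have := hpre d hd
    cases hg : (PySem.Dict.mk d).get? "type" with
    | none => rw [hg] at this; simp at this
    | some t' =>
      rw [hg] at this; simp at this
      have : t = t' := by rw [← hdt]; simp [PySem.Dict.getD, hg]
      subst this
      simpa [hg] using hpre d hd
  have hmain := pv_sum_eq_weighted (sd.map (fun data => (PySem.Dict.mk data).getD "type" 0)) hbounds
  rw [List.map_map] at hmain
  have : pvWeighted (sd.map (fun data => (PySem.Dict.mk data).getD "type" 0))
      = (PySem.List.pyRange 0 10 1).foldl
          (fun acc t => acc + (PySem.List.pyGet? [7,9,5,9,9,9,6,4,3,3] t).getD 0 *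
            ((sd.map (fun data => (PySem.Dict.mk data).getD "type" 0)).count t : Int)) 0 := rfl
  simp only [Function.comp_def] at hmain
  rw [← this]
  omega

-- ===== VERDICT (by name: the statement is the Claim_ definition above) =====
theorem calculate_attack_num_spec : Claim_equal_calculate_attack_num := by
  intro sd _ hpre
  exact pv_equiv sd hpre
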